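-- pv_equiv track=rewrite | github.com/cuthbertLab/music21 | music21/abcFormat/__init__.py | _buildMeasureBoundaryIndices
-- ===== SOURCE A (Python) =====
-- from typing import Union, Optional, List, Tuple, Any
--
-- def _buildMeasureBoundaryIndices(
--     positionList: List[int],
--     lastValidIndex: int
-- ) -> List[List[int]]:
--     '''
--     Staticmethod
--
--     Given a list of indices of a list marking the position of
--     each barline or implied barline, and the last valid index,
--     return a list of two-element lists, each indicating
--     the start and positions of a measure.
--
--     Here's an easy case that makes this method look worthless:
--
--     >>> AH = abcFormat.ABCHandler
--     >>> AH._buildMeasureBoundaryIndices([8, 12, 16], 20)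
--     [[0, 8], [8, 12], [12, 16], [16, 20]]
--
--     But in this case, we need to see that 12 and 13 don't represent different measures but
--     probably represent an end and new barline (repeat bar), etc.
--
--     >>> AH._buildMeasureBoundaryIndices([8, 12, 13, 16], 20)
--     [[0, 8], [8, 12], [13, 16], [16, 20]]
--
--     Here 115 is both the last barline and the last index, so there is no [115, 115] entry.
--
--     >>> bi = [9, 10, 16, 23, 29, 36, 42, 49, 56, 61, 62, 64, 70, 77, 84, 90, 96, 103, 110, 115]
--     >>> AH._buildMeasureBoundaryIndices(bi, 115)
--     [[0, 9], [10, 16], [16, 23], [23, 29], [29, 36], [36, 42], [42, 49], [49, 56], [56, 61],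
--      [62, 64], [64, 70], [70, 77], [77, 84], [84, 90], [90, 96],
--      [96, 103], [103, 110], [110, 115]]
--
--     '''
--     # collect start and end pairs of split
--     pairs = []
--     # first chunk is metadata, as first token is probably not a bar
--     pairs.append([0, positionList[0]])
--     i = positionList[0]  # get first bar position stored
--     # iterate through every other bar position (already have first)
--     for x in range(1, len(positionList)):
--         j = positionList[x]
--         if j == i + 1:  # a span of one is skipped
--             i = j
--             continue
--         pairs.append([i, j])
--         i = j  # the end becomes the new start
--     # add last valid index
--     if i != lastValidIndex:
--         pairs.append([i, lastValidIndex])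
--     # environLocal.printDebug(['splitByMeasure(); pairs pre filter', pairs])
--     return pairs
-- ===== SOURCE B (Python) =====
-- def _buildMeasureBoundaryIndices(positionList, lastValidIndex):
--     # Two-stage algorithm: (1) split the positions into maximal runs of
--     # consecutive integers (repeat barlines form one run); (2) pair the end of
--     # each run with the start of the next run, plus the metadata and terminal pairs.
--     rs = []
--     i = 0
--     n = len(positionList)
--     while i < n:
--         j = i + 1
--         while j < n and positionList[j] == positionList[j - 1] + 1:
--             j += 1
--         rs.append(positionList[i:j])
--         i = j
--     lastRun = rs[-1]  # IndexError on empty input, like A's positionList[0]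
--     starts = [0] + [r[-1] for r in rs[:-1]]
--     ends = [r[0] for r in rs]
--     pairs = [[s, e] for s, e in zip(starts, ends)]
--     if lastRun[-1] != lastValidIndex:
--         pairs.append([lastRun[-1], lastValidIndex])
--     return pairs
-- ===== Notes on version B (the rewrite author's own statement) =====
-- stated objective: alternative
-- what changed: Replaces A's single stateful scan (running start index, skip-on-span-of-one) with a two-stage algorithm: first group positions into maximal runs of consecutive integers, then zip run boundaries ([0]+run ends with run starts) into pairs and append the optional terminal pair.
-- outside the precondition, e.g. on _buildMeasureBoundaryIndices([], 20): A raises IndexError, B raises IndexError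
import Mathlib
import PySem

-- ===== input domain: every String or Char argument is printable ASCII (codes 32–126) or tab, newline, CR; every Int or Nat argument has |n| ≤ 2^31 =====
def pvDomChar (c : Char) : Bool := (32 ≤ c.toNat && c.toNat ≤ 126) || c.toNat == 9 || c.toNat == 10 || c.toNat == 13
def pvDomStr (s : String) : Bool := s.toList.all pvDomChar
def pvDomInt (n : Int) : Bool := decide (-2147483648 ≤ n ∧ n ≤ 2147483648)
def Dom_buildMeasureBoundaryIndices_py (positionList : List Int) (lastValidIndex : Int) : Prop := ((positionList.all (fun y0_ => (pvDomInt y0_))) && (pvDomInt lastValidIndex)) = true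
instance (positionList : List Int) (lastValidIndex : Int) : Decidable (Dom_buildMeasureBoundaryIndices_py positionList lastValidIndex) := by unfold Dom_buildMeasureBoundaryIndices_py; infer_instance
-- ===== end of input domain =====

-- B replaces A's single stateful scan with a two-stage algorithm: group positions
-- into maximal consecutive runs, then zip run boundaries into pairs (objective: alternative).

-- ===== PORT A =====
-- A's loop over range(1, len) reads positionList[x]; the fold walks the same tail
-- elements, carrying the same (pairs, i) state.
def buildMeasureBoundaryIndices_py (positionList : List Int) (lastValidIndex : Int) : List (List Int) :=
  match positionList with
  | [] => []  -- positionList[0] raises IndexError in Python; excluded by Pre_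
  | p0 :: rest =>
    let st := rest.foldl (fun (st : List (List Int) × Int) j =>
      if j = st.2 + 1 then (st.1, j)
      else (st.1 ++ [[st.2, j]], j)) ([[0, p0]], p0)
    if st.2 ≠ lastValidIndex then st.1 ++ [[st.2, lastValidIndex]] else st.1

-- ===== PORT B =====
-- port of Source B's inner `while` loop: consumes the tail of a run whose
-- current last element is `last`, returning (rest of the run, remainder of the list)
def pvTakeRun (last : Int) : List Int → List Int × List Int
  | [] => ([], [])
  | p :: rest =>
    if p = last + 1 then
      let (r, rem) := pvTakeRun p rest
      (p :: r, rem)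
    else ([], p :: rest)

theorem pvTakeRun_len (last : Int) (l : List Int) : (pvTakeRun last l).2.length ≤ l.length := by
  induction l generalizing last with
  | nil => simp [pvTakeRun]
  | cons p rest ih =>
    simp only [pvTakeRun]
    split
    · exact le_trans (ih p) (Nat.le_succ _)
    · simp

-- port of Source B's outer `while` loop: maximal runs of consecutive integers
def pvRuns : List Int → List (List Int)
  | [] => []
  | h :: t =>
    (h :: (pvTakeRun h t).1) :: pvRuns (pvTakeRun h t).2
termination_by l => l.length
decreasing_by exact Nat.lt_succ_of_le (pvTakeRun_len h t)

def buildMeasureBoundaryIndices_py_alt (positionList : List Int) (lastValidIndex : Int) : List (List Int) :=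
  let rs := pvRuns positionList
  match rs.getLast? with
  | none => []  -- rs[-1] raises IndexError in Python (empty input); excluded by Pre_
  | some lastRun =>
    let starts := 0 :: (rs.dropLast.map fun r => r.getLastD 0)
    let ends := rs.map fun r => r.headD 0
    ((starts.zip ends).map fun se => [se.1, se.2]) ++
      (if lastRun.getLastD 0 ≠ lastValidIndex then [[lastRun.getLastD 0, lastValidIndex]] else [])

-- ===== PRECONDITION & SPEC =====
-- Pre_ excludes only the empty positionList, on which A raises IndexError at positionList[0].
def Pre_buildMeasureBoundaryIndices_py (positionList : List Int) (_lastValidIndex : Int) : Prop := positionList ≠ []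
instance (positionList : List Int) (lastValidIndex : Int) : Decidable (Pre_buildMeasureBoundaryIndices_py positionList lastValidIndex) := by unfold Pre_buildMeasureBoundaryIndices_py; infer_instance
def pvWitness_buildMeasureBoundaryIndices_py : List Int × Int := ([8, 12, 13, 16], 20)

def Spec_buildMeasureBoundaryIndices_py (positionList : List Int) (lastValidIndex : Int) (out : List (List Int)) : Prop := out = buildMeasureBoundaryIndices_py_alt positionList lastValidIndex
instance (positionList : List Int) (lastValidIndex : Int) (out : List (List Int)) : Decidable (Spec_buildMeasureBoundaryIndices_py positionList lastValidIndex out) := by unfold Spec_buildMeasureBoundaryIndices_py; infer_instance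

-- ===== CLAIM (what is proved, stated in full; the proofs are below) =====
def Claim_equal_buildMeasureBoundaryIndices_py : Prop := ∀ (positionList : List Int) (lastValidIndex : Int), Dom_buildMeasureBoundaryIndices_py positionList lastValidIndex → Pre_buildMeasureBoundaryIndices_py positionList lastValidIndex → Spec_buildMeasureBoundaryIndices_py positionList lastValidIndex (buildMeasureBoundaryIndices_py positionList lastValidIndex)

-- ===== LEMMAS AND PROOFS =====

-- proof-side device: the filtered adjacent pairs both programs compute
def pvAdjPairs : List Int → List (List Int)
  | a :: b :: rest => (if b ≠ a + 1 then [[a, b]] else []) ++ pvAdjPairs (b :: rest)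
  | _ => []

-- proof-side device: the inter-run pairs B's zip produces after the first pair
def pvInter : List (List Int) → List (List Int)
  | r1 :: r2 :: rs => [r1.getLastD 0, r2.headD 0] :: pvInter (r2 :: rs)
  | _ => []

-- A's fold, started with accumulator `acc` and running start `i`, appends exactly
-- the filtered adjacent pairs of (i :: rest) and ends with the last element of (i :: rest).
theorem pvFold_eq_adjPairs (rest : List Int) (i : Int) (acc : List (List Int)) :
    rest.foldl (fun (st : List (List Int) × Int) j =>
      if j = st.2 + 1 then (st.1, j)
      else (st.1 ++ [[st.2, j]], j)) (acc, i)
    = (acc ++ pvAdjPairs (i :: rest), (i :: rest).getLastD 0) := by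
  induction rest generalizing i acc with
  | nil => simp [pvAdjPairs]
  | cons b rest ih =>
    simp only [List.foldl_cons]
    by_cases h : b = i + 1
    · simp [h, ih, pvAdjPairs]
    · simp [h, ih, pvAdjPairs]

theorem pvTakeRun_append (t : List Int) (last : Int) :
    (pvTakeRun last t).1 ++ (pvTakeRun last t).2 = t := by
  induction t generalizing last with
  | nil => simp [pvTakeRun]
  | cons p rest ih =>
    simp only [pvTakeRun]
    by_cases h : p = last + 1 <;> simp [h, ih]

-- pvTakeRun stops exactly at a non-consecutive element
theorem pvTakeRun_stop (t : List Int) (last : Int) (rh : Int) (rt : List Int)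
    (h : (pvTakeRun last t).2 = rh :: rt) :
    rh ≠ ((last :: (pvTakeRun last t).1).getLastD 0) + 1 := by
  induction t generalizing last with
  | nil => simp [pvTakeRun] at h
  | cons p rest ih =>
    by_cases hp : p = last + 1
    · subst hp
      simp only [pvTakeRun] at h ⊢
      simpa [List.getLastD_cons] using ih (last + 1) h
    · simp only [pvTakeRun, if_neg hp] at h ⊢
      injection h with h1 _
      subst h1
      simpa [List.getLastD_cons, List.getLastD] using hp

-- collapsing a consecutive run does not change the filtered adjacent pairs
theorem pvAdj_run (t : List Int) (last : Int) :
    pvAdjPairs (last :: t)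
      = pvAdjPairs (((last :: (pvTakeRun last t).1).getLastD 0) :: (pvTakeRun last t).2) := by
  induction t generalizing last with
  | nil => simp [pvTakeRun, List.getLastD]
  | cons p rest ih =>
    by_cases hp : p = last + 1
    · subst hp
      simp only [pvTakeRun]
      have hskip : pvAdjPairs (last :: (last + 1) :: rest) = pvAdjPairs ((last + 1) :: rest) := by
        simp [pvAdjPairs]
      rw [hskip, ih (last + 1)]
      simp
    · simp [pvTakeRun, if_neg hp, List.getLastD]

-- B's zip-map over a nonempty run list, with leading start s0
theorem pvZip_shape (rs : List (List Int)) (s0 : Int) (r1 : List Int) (rest : List (List Int))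
    (hrs : rs = r1 :: rest) :
    (((s0 :: (rs.dropLast.map fun r => r.getLastD 0)).zip (rs.map fun r => r.headD 0)).map
        fun se => [se.1, se.2])
      = [s0, r1.headD 0] :: pvInter rs := by
  subst hrs
  induction rest generalizing s0 r1 with
  | nil => simp [pvInter]
  | cons r2 rest ih =>
    have h2 := ih (r1.getLastD 0) r2
    simp only [List.dropLast_cons₂, List.map_cons, List.zip_cons_cons, List.map] at h2 ⊢
    rw [h2]
    simp [pvInter]

-- appending a nonempty tail shifts getLastD to the tail
theorem pvGetLastD_append (l1 : List Int) (a : Int) (tl : List Int) (d : Int) :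
    (l1 ++ a :: tl).getLastD d = (a :: tl).getLastD d := by
  induction l1 generalizing d with
  | nil => rfl
  | cons x xs ih =>
    rw [List.cons_append, List.getLastD_cons, ih x]
    simp [List.getLastD_eq_getLast?, List.getLast?_cons]

-- the run decomposition: nonempty, first head, inter-run pairs, last element
theorem pvRuns_spec_aux (n : Nat) :
    ∀ (h : Int) (t : List Int), t.length ≤ n →
    pvRuns (h :: t) ≠ [] ∧
    ((pvRuns (h :: t)).headD []).headD 0 = h ∧
    pvInter (pvRuns (h :: t)) = pvAdjPairs (h :: t) ∧
    ((pvRuns (h :: t)).getLastD []).getLastD 0 = (h :: t).getLastD 0 := by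
  induction n with
  | zero =>
    intro h t ht
    have ht0 : t = [] := List.length_eq_zero_iff.mp (Nat.le_zero.mp ht)
    subst ht0
    rw [pvRuns]
    refine ⟨by simp, by simp [pvTakeRun], ?_, ?_⟩
    · simp [pvTakeRun, pvRuns, pvInter, pvAdjPairs]
    · simp [pvTakeRun, pvRuns, List.getLastD]
  | succ n ih =>
    intro h t ht
    rw [pvRuns]
    rcases hrem : (pvTakeRun h t).2 with _ | ⟨rh, rt⟩
    · have hadj := pvAdj_run t h
      rw [hrem] at hadj
      have happ := pvTakeRun_append t h
      rw [hrem] at happ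
      simp only [List.append_nil] at happ
      refine ⟨by simp, by simp, ?_, ?_⟩
      · rw [show pvRuns ([] : List Int) = [] from by rw [pvRuns]]
        rw [hadj]
        simp [pvInter, pvAdjPairs]
      · rw [show pvRuns ([] : List Int) = [] from by rw [pvRuns]]
        simp [happ]
    · have hlen : rt.length ≤ n := by
        have h1 : (pvTakeRun h t).2.length ≤ t.length := pvTakeRun_len h t
        rw [hrem] at h1
        simp only [List.length_cons] at h1
        omega
      obtain ⟨hne, hhd, hint, hlast⟩ := ih rh rt hlen
      rcases hrs : pvRuns (rh :: rt) with _ | ⟨r2, rs'⟩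
      · exact absurd hrs hne
      rw [hrs] at hhd hint hlast
      have hstop := pvTakeRun_stop t h rh rt hrem
      have hadj := pvAdj_run t h
      rw [hrem] at hadj
      have happ := pvTakeRun_append t h
      rw [hrem] at happ
      refine ⟨by simp, by simp, ?_, ?_⟩
      · simp only [pvInter]
        rw [hint]
        have hhd2 : r2.headD 0 = rh := hhd
        rw [hhd2, hadj]
        have hstep : pvAdjPairs ((h :: (pvTakeRun h t).1).getLastD 0 :: rh :: rt)
            = [[(h :: (pvTakeRun h t).1).getLastD 0, rh]] ++ pvAdjPairs (rh :: rt) := by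
          simp only [pvAdjPairs]
          rw [if_pos hstop]
        rw [hstep]
        rfl
      · have hsplit : (h :: t).getLastD 0 = (rh :: rt).getLastD 0 := by
          rw [show h :: t = (h :: (pvTakeRun h t).1) ++ (rh :: rt) from by
            rw [List.cons_append, happ]]
          exact pvGetLastD_append _ rh rt 0
        rw [hsplit, ← hlast]
        simp

-- ===== VERDICT (by name: the statement is the Claim_ definition above) =====
theorem buildMeasureBoundaryIndices_py_spec : Claim_equal_buildMeasureBoundaryIndices_py := by
  intro positionList lastValidIndex _ hpre
  unfold Spec_buildMeasureBoundaryIndices_py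
  match positionList with
  | [] => exact absurd rfl hpre
  | h :: t =>
    obtain ⟨hne, hhd, hint, hlast⟩ := pvRuns_spec_aux t.length h t le_rfl
    rcases hrs : pvRuns (h :: t) with _ | ⟨r1, rest⟩
    · exact absurd hrs hne
    rw [hrs] at hhd hint hlast
    have hsome : (r1 :: rest).getLast? = some ((r1 :: rest).getLastD []) := by
      rw [List.getLastD_eq_getLast?]
      rcases hg : (r1 :: rest).getLast? with _ | v
    -- getLast? of a cons is never none
      · exact absurd hg (by simp)
      · rfl
    have hzip := pvZip_shape (r1 :: rest) 0 r1 rest rfl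
    have hhd' : r1.headD 0 = h := hhd
    simp only [buildMeasureBoundaryIndices_py, buildMeasureBoundaryIndices_py_alt, hrs,
      pvFold_eq_adjPairs, hsome, hzip, hint, hlast]
    rw [hhd']
    split <;> simp
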